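-- pv_equiv track=rewrite | github.com/teshchaudhary/Practice_DSA | Ticket_Counter.py | distributeTicket
-- ===== SOURCE A (Python) =====
-- from collections import deque
--
-- def distributeTicket(N, K):
--     q = deque()
--     for i in range(1, N+1):
--         q.append(i)
--
--     while q:
--         for i in range(K):
--             if q:
--                 ele = q.popleft()
--
--         for i in range(K):
--             if q:
--                 ele = q.pop()
--
--     return ele
-- ===== SOURCE B (Python) =====
-- def distributeTicket(N, K):
--     # O(N/K): track the remaining contiguous range [lo, hi] and do each
--     # K-removal round with arithmetic instead of popping one element at a time.
--     lo, hi = 1, N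
--     while lo <= hi:
--         t = min(K, hi - lo + 1)
--         ele = lo + t - 1
--         lo += t
--         if lo > hi:
--             return ele
--         t = min(K, hi - lo + 1)
--         ele = hi - t + 1
--         hi -= t
--     return ele
-- ===== Notes on version B (the rewrite author's own statement) =====
-- stated objective: faster
-- what changed: B replaces the deque simulation that pops N elements one by one with O(1) arithmetic per front/back round over a contiguous range [lo,hi], so only O(N/K) rounds are executed.
import Mathlib
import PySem

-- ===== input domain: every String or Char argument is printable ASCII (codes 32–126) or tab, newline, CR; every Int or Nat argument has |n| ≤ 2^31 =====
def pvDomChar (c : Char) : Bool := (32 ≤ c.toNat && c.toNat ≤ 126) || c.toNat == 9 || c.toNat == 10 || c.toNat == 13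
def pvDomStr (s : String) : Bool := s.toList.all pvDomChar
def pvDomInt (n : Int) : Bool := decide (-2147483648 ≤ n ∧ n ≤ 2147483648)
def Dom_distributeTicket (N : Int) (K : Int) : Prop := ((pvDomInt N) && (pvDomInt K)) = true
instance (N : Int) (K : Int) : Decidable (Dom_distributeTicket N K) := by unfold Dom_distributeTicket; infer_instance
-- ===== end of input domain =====

-- B replaces A's one-element-at-a-time deque simulation by O(1) arithmetic per
-- front/back round on a contiguous range [lo,hi] (O(N/K) rounds instead of O(N) pops).

-- ===== PORT A =====
-- `for i in range(K): if q: ele = q.popleft()`  (k = number of remaining iterations)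
def pvPopFrontK (k : Nat) (q : List Int) (ele : Int) : List Int × Int :=
  match k with
  | 0 => (q, ele)
  | k + 1 =>
    match q with
    | [] => pvPopFrontK k [] ele
    | x :: xs => pvPopFrontK k xs x

-- `for i in range(K): if q: ele = q.pop()`
def pvPopBackK (k : Nat) (q : List Int) (ele : Int) : List Int × Int :=
  match k with
  | 0 => (q, ele)
  | k + 1 =>
    if q = [] then pvPopBackK k q ele
    else pvPopBackK k q.dropLast (q.getLastD ele)

-- the `while q:` loop; fuel N.toNat + 1 suffices since each round (K ≥ 1) removes
-- at least one element; for K ≤ 0 Python diverges (excluded by Pre_).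
def pvLoopA (K : Int) : Nat → List Int → Int → Int
  | 0, _, ele => ele
  | fuel + 1, q, ele =>
    if q = [] then ele
    else
      let p1 := pvPopFrontK K.toNat q ele
      let p2 := pvPopBackK K.toNat p1.1 p1.2
      pvLoopA K fuel p2.1 p2.2

def distributeTicket (N : Int) (K : Int) : Int :=
  -- q = deque(); for i in range(1, N+1): q.append(i)
  pvLoopA K (N.toNat + 1) (PySem.List.pyRange 1 (N + 1) 1) 0
  -- initial `ele` 0 is a placeholder: with N ≥ 1 and K ≥ 1 the first popleft overwrites it
  -- (for N ≤ 0 Python raises NameError; excluded by Pre_)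

-- ===== PORT B =====
def pvLoopB (K : Int) : Nat → Int → Int → Int → Int
  | 0, _, _, ele => ele
  | fuel + 1, lo, hi, ele =>
    if lo ≤ hi then
      let t1 := min K (hi - lo + 1)
      let e1 := lo + t1 - 1
      let lo' := lo + t1
      if lo' > hi then e1
      else
        let t2 := min K (hi - lo' + 1)
        pvLoopB K fuel lo' (hi - t2) (hi - t2 + 1)
    else ele

def distributeTicket_alt (N : Int) (K : Int) : Int :=
  pvLoopB K (N.toNat + 1) 1 N 0

-- ===== PRECONDITION & SPEC =====
-- Pre_: exactly where Python A returns: for N ≤ 0 it raises NameError (ele unbound),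
-- for K ≤ 0 (with N ≥ 1) the while loop never removes anything and A diverges.
def Pre_distributeTicket (N : Int) (K : Int) : Prop := 1 ≤ N ∧ 1 ≤ K
instance (N : Int) (K : Int) : Decidable (Pre_distributeTicket N K) := by
  unfold Pre_distributeTicket; infer_instance
def pvWitness_distributeTicket : Int × Int := (7, 2)

def Spec_distributeTicket (N : Int) (K : Int) (out : Int) : Prop := out = distributeTicket_alt N K
instance (N : Int) (K : Int) (out : Int) : Decidable (Spec_distributeTicket N K out) := by unfold Spec_distributeTicket; infer_instance

-- ===== CLAIM (what is proved, stated in full; the proofs are below) =====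
def Claim_equal_distributeTicket : Prop := ∀ (N : Int) (K : Int), Dom_distributeTicket N K → Pre_distributeTicket N K → Spec_distributeTicket N K (distributeTicket N K)

-- ===== LEMMAS AND PROOFS =====

-- abbreviation used only by the proofs: the contiguous queue [lo..hi]
def pvR (lo hi : Int) : List Int := PySem.List.pyRange lo (hi + 1) 1

theorem pvR_eq_nil {lo hi : Int} (h : hi < lo) : pvR lo hi = [] := by
  unfold pvR; exact PySem.List.pyRange_one_eq_nil (by omega)

theorem pvR_cons {lo hi : Int} (h : lo ≤ hi) : pvR lo hi = lo :: pvR (lo + 1) hi := by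
  unfold pvR; exact PySem.List.pyRange_one_cons (by omega)

theorem pvR_snoc {lo hi : Int} (h : lo ≤ hi) : pvR lo hi = pvR lo (hi - 1) ++ [hi] := by
  unfold pvR
  have := PySem.List.pyRange_one_succ_right (a := lo) (b := hi) (by omega)
  simpa [show hi - 1 + 1 = hi by ring] using this

theorem pvR_ne_nil {lo hi : Int} (h : lo ≤ hi) : pvR lo hi ≠ [] := by
  rw [pvR_cons h]; simp

theorem pvPopFrontK_nil (k : Nat) (ele : Int) : pvPopFrontK k [] ele = ([], ele) := by
  induction k with
  | zero => rfl
  | succ k ih => simpa [pvPopFrontK] using ih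

theorem pvPopBackK_nil (k : Nat) (ele : Int) : pvPopBackK k [] ele = ([], ele) := by
  induction k with
  | zero => rfl
  | succ k ih => simpa [pvPopBackK] using ih

theorem pvPopFrontK_le {k : Nat} : ∀ {lo hi : Int} (ele : Int), 1 ≤ (k : Int) →
    (k : Int) ≤ hi + 1 - lo →
    pvPopFrontK k (pvR lo hi) ele = (pvR (lo + k) hi, lo + k - 1) := by
  induction k with
  | zero => intro lo hi ele h1 _; simp at h1
  | succ k ih =>
    intro lo hi ele h1 h2
    have hlh : lo ≤ hi := by push_cast at h2 ⊢; omega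
    rw [pvR_cons hlh]
    show pvPopFrontK k (pvR (lo + 1) hi) lo = _
    rcases Nat.eq_zero_or_pos k with hk | hk
    · subst hk
      simp [pvPopFrontK]
    · have := ih (lo := lo + 1) (hi := hi) lo (by exact_mod_cast hk)
        (by push_cast at h2 ⊢; omega)
      have hcast : lo + 1 + (k : Int) = lo + ((k + 1 : Nat) : Int) := by push_cast; ring
      rw [this, hcast]

theorem pvPopFrontK_gt {k : Nat} : ∀ {lo hi : Int} (ele : Int), lo ≤ hi →
    hi + 1 - lo < (k : Int) →
    pvPopFrontK k (pvR lo hi) ele = ([], hi) := by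
  induction k with
  | zero => intro lo hi ele h1 h2; push_cast at h2; omega
  | succ k ih =>
    intro lo hi ele h1 h2
    rw [pvR_cons h1]
    show pvPopFrontK k (pvR (lo + 1) hi) lo = _
    by_cases hlh : lo + 1 ≤ hi
    · exact ih lo hlh (by push_cast at h2 ⊢; omega)
    · have : pvR (lo + 1) hi = [] := pvR_eq_nil (by omega)
      rw [this, pvPopFrontK_nil]
      have : lo = hi := by omega
      simp [this]

theorem pvPopBackK_le {k : Nat} : ∀ {lo hi : Int} (ele : Int), 1 ≤ (k : Int) →
    (k : Int) ≤ hi + 1 - lo →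
    pvPopBackK k (pvR lo hi) ele = (pvR lo (hi - k), hi - k + 1) := by
  induction k with
  | zero => intro lo hi ele h1 _; simp at h1
  | succ k ih =>
    intro lo hi ele h1 h2
    have hlh : lo ≤ hi := by push_cast at h2 ⊢; omega
    rw [pvR_snoc hlh]
    rw [pvPopBackK, if_neg (List.append_ne_nil_of_right_ne_nil _ (by simp)),
      List.dropLast_concat, List.getLastD_concat]
    rcases Nat.eq_zero_or_pos k with hk | hk
    · subst hk
      simp [pvPopBackK]
    · have hcast : hi - 1 - (k : Int) = hi - ((k + 1 : Nat) : Int) := by push_cast; ring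
      have := ih (lo := lo) (hi := hi - 1) hi (by exact_mod_cast hk)
        (by push_cast at h2 ⊢; omega)
      rw [this, hcast]

theorem pvPopBackK_gt {k : Nat} : ∀ {lo hi : Int} (ele : Int), lo ≤ hi →
    hi + 1 - lo < (k : Int) →
    pvPopBackK k (pvR lo hi) ele = ([], lo) := by
  induction k with
  | zero => intro lo hi ele h1 h2; push_cast at h2; omega
  | succ k ih =>
    intro lo hi ele h1 h2
    rw [pvR_snoc h1]
    rw [pvPopBackK, if_neg (List.append_ne_nil_of_right_ne_nil _ (by simp)),
      List.dropLast_concat, List.getLastD_concat]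
    by_cases hlh : lo ≤ hi - 1
    · exact ih hi hlh (by push_cast at h2 ⊢; omega)
    · have : pvR lo (hi - 1) = [] := pvR_eq_nil (by omega)
      rw [this, pvPopBackK_nil]
      have : lo = hi := by omega
      simp [this]

theorem pvLoopA_nil (K : Int) (fuel : Nat) (ele : Int) : pvLoopA K fuel [] ele = ele := by
  cases fuel <;> simp [pvLoopA]

theorem pvLoopB_empty (K : Int) (fuel : Nat) {lo hi : Int} (ele : Int) (h : hi < lo) :
    pvLoopB K fuel lo hi ele = ele := by
  cases fuel with
  | zero => rfl
  | succ f => simp [pvLoopB, show ¬ lo ≤ hi by omega]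

-- main invariant: on the contiguous queue [lo..hi] the two loops agree, fuel in lockstep
theorem pvLoop_eq (K : Int) (hK : 1 ≤ K) : ∀ (fuel : Nat) (lo hi ele : Int),
    pvLoopA K fuel (pvR lo hi) ele = pvLoopB K fuel lo hi ele := by
  intro fuel
  induction fuel with
  | zero => intro lo hi ele; rfl
  | succ fuel ih =>
    intro lo hi ele
    by_cases hlh : lo ≤ hi
    · have hKt : (K.toNat : Int) = K := Int.toNat_of_nonneg (by omega)
      have hK1 : 1 ≤ (K.toNat : Int) := by omega
      rw [pvLoopA, pvLoopB, if_neg (pvR_ne_nil hlh), if_pos hlh]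
      by_cases hfront : K ≤ hi + 1 - lo
      · -- front round removes exactly K elements
        have hmin : min K (hi - lo + 1) = K := by omega
        rw [pvPopFrontK_le ele hK1 (by omega)]
        simp only [hmin, hKt]
        by_cases hrest : lo + K ≤ hi
        · rw [if_neg (by omega)]
          by_cases hback : K ≤ hi + 1 - (lo + K)
          · have hmin2 : min K (hi - (lo + K) + 1) = K := by omega
            rw [pvPopBackK_le _ hK1 (by omega)]
            simp only [hmin2, hKt]
            exact ih (lo + K) (hi - K) (hi - K + 1)
          · have hmin2 : min K (hi - (lo + K) + 1) = hi - (lo + K) + 1 := by omega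
            rw [pvPopBackK_gt _ hrest (by omega)]
            simp only [hmin2]
            rw [pvLoopA_nil, pvLoopB_empty K fuel _ (by omega)]
            omega
        · -- queue emptied by the front round
          rw [if_pos (by omega)]
          have : pvR (lo + K) hi = [] := pvR_eq_nil (by omega)
          rw [this, pvPopBackK_nil, pvLoopA_nil]
      · -- front round drains the whole queue
        have hmin : min K (hi - lo + 1) = hi - lo + 1 := by omega
        rw [pvPopFrontK_gt ele hlh (by omega)]
        simp only [hmin, pvPopBackK_nil, pvLoopA_nil]
        rw [if_pos (by omega)]
        omega
    · rw [pvR_eq_nil (by omega), pvLoopA_nil, pvLoopB_empty K _ _ (by omega)]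

-- ===== VERDICT (by name: the statement is the Claim_ definition above) =====
theorem distributeTicket_spec : Claim_equal_distributeTicket := by
  intro N K _ hpre
  obtain ⟨hN, hK⟩ := hpre
  show distributeTicket N K = distributeTicket_alt N K
  unfold distributeTicket distributeTicket_alt
  have : PySem.List.pyRange 1 (N + 1) 1 = pvR 1 N := rfl
  rw [this, pvLoop_eq K hK]
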